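-- pv_equiv track=rewrite | github.com/ninjra/autocapture_prime | autocapture_nx/processing/sst/extract.py | _edges_from_centers
-- ===== SOURCE A (Python) =====
-- def _edges_from_centers(centers: list[int]) -> list[int]:
--     if not centers:
--         return [0, 1]
--     centers = sorted(int(c) for c in centers)
--     edges = [max(0, centers[0] - 1)]
--     for a, b in zip(centers, centers[1:]):
--         edges.append((a + b) // 2)
--     edges.append(centers[-1] + 1)
--     # Ensure strictly increasing edges.
--     for idx in range(1, len(edges)):
--         if edges[idx] <= edges[idx - 1]:
--             edges[idx] = edges[idx - 1] + 1
--     return edges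
-- ===== SOURCE B (Python) =====
-- def _edges_from_centers(centers: list[int]) -> list[int]:
--     if not centers:
--         return [0, 1]
--     cs = sorted(int(c) for c in centers)
--     prev = max(0, cs[0] - 1)
--     out = [prev]
--     for a, b in zip(cs, cs[1:]):
--         prev = max((a + b) // 2, prev + 1)
--         out.append(prev)
--     out.append(max(cs[-1] + 1, prev + 1))
--     return out
-- ===== Notes on version B (the rewrite author's own statement) =====
-- stated objective: simpler
-- what changed: B fuses A's two passes (build the raw edge list, then an index loop repairing monotonicity in place) into one streaming loop that carries the last emitted edge and clamps each new edge with max(raw, prev+1) as it is produced.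
import Mathlib
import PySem

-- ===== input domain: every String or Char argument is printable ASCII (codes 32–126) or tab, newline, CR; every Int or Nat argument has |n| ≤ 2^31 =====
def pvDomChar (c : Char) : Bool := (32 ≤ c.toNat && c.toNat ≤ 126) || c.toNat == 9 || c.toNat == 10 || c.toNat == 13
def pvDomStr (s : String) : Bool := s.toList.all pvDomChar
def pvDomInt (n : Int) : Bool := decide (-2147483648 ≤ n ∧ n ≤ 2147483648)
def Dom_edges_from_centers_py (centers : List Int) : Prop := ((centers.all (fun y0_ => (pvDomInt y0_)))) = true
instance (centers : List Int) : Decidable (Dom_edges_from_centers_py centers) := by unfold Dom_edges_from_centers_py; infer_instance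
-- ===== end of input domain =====

-- B fuses A's two passes (build raw edges, then repair monotonicity by index) into one
-- streaming pass carrying the last emitted edge; same asymptotic cost, simpler shape.

-- ===== PORT A =====
-- second pass of A: for idx in range(1, len(edges)): if edges[idx] <= edges[idx-1]: edges[idx] = edges[idx-1] + 1
def pvFixA : Int → List Int → List Int
  | _, [] => []
  | p, x :: xs =>
    let y := if x ≤ p then p + 1 else x
    y :: pvFixA y xs

def edges_from_centers_py (centers : List Int) : List Int :=
  if centers = [] then [0, 1] else
    let cs := PySem.List.sorted centers (fun c => c) false
    -- edges = [max(0, cs[0]-1)] + midpoints of zip(cs, cs[1:]) + [cs[-1] + 1]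
    let edges := (max 0 (cs.headD 0 - 1)) ::
      ((cs.zip cs.tail).map (fun q => PySem.Int.floordiv (q.1 + q.2) 2) ++ [cs.getLastD 0 + 1])
    match edges with
    | [] => []
    | e :: rest => e :: pvFixA e rest

-- ===== PORT B =====
-- B's single loop: prev is the last emitted edge; a is the current center, the list is the remaining centers
def pvEmitB : Int → Int → List Int → List Int
  | prev, a, [] => [max (a + 1) (prev + 1)]
  | prev, a, b :: rest =>
    let e := max (PySem.Int.floordiv (a + b) 2) (prev + 1)
    e :: pvEmitB e b rest

def edges_from_centers_py_alt (centers : List Int) : List Int :=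
  if centers = [] then [0, 1] else
    match PySem.List.sorted centers (fun c => c) false with
    | [] => [0, 1]  -- unreachable: sorted of a nonempty list is nonempty
    | a :: rest =>
      let e0 := max 0 (a - 1)
      e0 :: pvEmitB e0 a rest

-- ===== PRECONDITION & SPEC =====
def Spec_edges_from_centers_py (centers : List Int) (out : List Int) : Prop := out = edges_from_centers_py_alt centers
instance (centers : List Int) (out : List Int) : Decidable (Spec_edges_from_centers_py centers out) := by unfold Spec_edges_from_centers_py; infer_instance

-- ===== CLAIM (what is proved, stated in full; the proofs are below) =====
def Claim_equal_edges_from_centers_py : Prop := ∀ (centers : List Int), Dom_edges_from_centers_py centers → Spec_edges_from_centers_py centers (edges_from_centers_py centers)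

-- ===== LEMMAS AND PROOFS =====

-- A's repair pass over the raw tail equals B's fused emission loop.
lemma pvFix_eq_emit : ∀ (rest : List Int) (a p d : Int),
    pvFixA p (((a :: rest).zip rest).map (fun q => PySem.Int.floordiv (q.1 + q.2) 2)
      ++ [(a :: rest).getLastD d + 1]) = pvEmitB p a rest := by
  intro rest
  induction rest with
  | nil =>
      intro a p d
      simp only [List.zip_nil_right, List.map_nil, List.nil_append, List.getLastD_cons,
        List.getLastD_nil, pvFixA, pvEmitB, Int.max_def, List.cons.injEq, and_true]
      split <;> split <;> omega
  | cons b t ih =>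
      intro a p d
      rw [List.getLastD_cons]
      simp only [List.zip_cons_cons, List.map_cons, List.cons_append, pvFixA, pvEmitB]
      rw [show (if PySem.Int.floordiv (a + b) 2 ≤ p then p + 1 else PySem.Int.floordiv (a + b) 2)
          = max (PySem.Int.floordiv (a + b) 2) (p + 1) by
        simp only [Int.max_def]; split <;> split <;> omega]
      rw [ih]

-- ===== VERDICT (by name: the statement is the Claim_ definition above) =====
theorem edges_from_centers_py_spec : Claim_equal_edges_from_centers_py := by
  intro centers _
  unfold Spec_edges_from_centers_py edges_from_centers_py edges_from_centers_py_alt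
  by_cases h : centers = []
  · simp [h]
  · simp only [h, ite_false]
    have hne : PySem.List.sorted centers (fun c => c) false ≠ [] := by
      simpa [PySem.List.sorted_eq_nil_iff] using h
    obtain ⟨a, rest, hcs⟩ := List.exists_cons_of_ne_nil hne
    rw [hcs]
    simp only [List.headD_cons, List.tail_cons]
    rw [pvFix_eq_emit]
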